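-- pv_equiv track=rewrite | github.com/IDEA-NTHU-Taiwan/PatternTutorial | IDEAlib/pattern.py | token2cwsw
-- ===== SOURCE A (Python) =====
-- def token2cwsw(tokens, cw_list, sw_list, cw_token='cw',
--                sw_token='sw', none_token='_', both_token='both'):
--     """
--     The rule here is very flexible.
--     """
--     cwsw_list = []
--     for token in tokens:
--         if token in cw_list:
--             if token in sw_list:
--                 cwsw_list.append(both_token)
--             else:
--                 cwsw_list.append(cw_token)
--         elif token in sw_list:
--             cwsw_list.append(sw_token)
--         else:
--             cwsw_list.append(none_token)
--     return cwsw_list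
-- ===== SOURCE B (Python) =====
-- def token2cwsw(tokens, cw_list, sw_list, cw_token='cw',
--                sw_token='sw', none_token='_', both_token='both'):
--     d = dict.fromkeys(sw_list, sw_token)
--     sw_set = set(sw_list)
--     for w in cw_list:
--         d[w] = both_token if w in sw_set else cw_token
--     return [d.get(t, none_token) for t in tokens]
-- ===== Notes on version B (the rewrite author's own statement) =====
-- stated objective: faster
-- what changed: Replaces the per-token nested list-membership branching with a classification dict built once from sw_list and cw_list, then a single flat lookup pass over tokens.
import Mathlib
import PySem

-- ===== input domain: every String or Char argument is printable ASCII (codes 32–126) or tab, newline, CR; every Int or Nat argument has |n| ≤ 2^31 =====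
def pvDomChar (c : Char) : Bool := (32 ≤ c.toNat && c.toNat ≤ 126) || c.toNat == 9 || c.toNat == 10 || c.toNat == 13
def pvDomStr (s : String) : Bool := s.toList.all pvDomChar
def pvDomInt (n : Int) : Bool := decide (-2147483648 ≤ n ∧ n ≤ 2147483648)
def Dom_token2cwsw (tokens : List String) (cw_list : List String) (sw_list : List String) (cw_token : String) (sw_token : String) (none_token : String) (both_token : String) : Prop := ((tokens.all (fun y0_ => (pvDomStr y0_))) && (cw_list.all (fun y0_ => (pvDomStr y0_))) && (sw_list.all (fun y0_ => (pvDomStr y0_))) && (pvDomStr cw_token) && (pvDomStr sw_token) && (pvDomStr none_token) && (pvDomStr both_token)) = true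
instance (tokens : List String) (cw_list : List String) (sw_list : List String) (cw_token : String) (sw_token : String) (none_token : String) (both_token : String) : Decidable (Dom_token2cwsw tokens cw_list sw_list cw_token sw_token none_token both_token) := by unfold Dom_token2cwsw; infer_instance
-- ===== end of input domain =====

-- B builds a classification dict once from sw_list/cw_list and does one flat lookup pass over tokens (asymptotically faster than A's per-token list scans).


-- ===== PORT A =====
def token2cwsw (tokens : List String) (cw_list : List String) (sw_list : List String) (cw_token : String) (sw_token : String) (none_token : String) (both_token : String) : List String :=
  tokens.foldl (fun cwsw_list token =>
    if token ∈ cw_list then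
      if token ∈ sw_list then cwsw_list ++ [both_token]
      else cwsw_list ++ [cw_token]
    else if token ∈ sw_list then cwsw_list ++ [sw_token]
    else cwsw_list ++ [none_token]) []

-- ===== PORT B =====
def token2cwsw_alt (tokens : List String) (cw_list : List String) (sw_list : List String) (cw_token : String) (sw_token : String) (none_token : String) (both_token : String) : List String :=
  let d0 : PySem.Dict String String := PySem.Dict.ofList (sw_list.map (fun w => (w, sw_token)))
  let sw_set : PySem.Set String := PySem.Set.ofList sw_list
  let d := cw_list.foldl (fun d w => d.insert w (if w ∈ sw_set then both_token else cw_token)) d0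
  tokens.map (fun t => d.getD t none_token)

-- ===== PRECONDITION & SPEC =====
def Spec_token2cwsw (tokens : List String) (cw_list : List String) (sw_list : List String) (cw_token : String) (sw_token : String) (none_token : String) (both_token : String) (out : List String) : Prop := out = token2cwsw_alt tokens cw_list sw_list cw_token sw_token none_token both_token
instance (tokens : List String) (cw_list : List String) (sw_list : List String) (cw_token : String) (sw_token : String) (none_token : String) (both_token : String) (out : List String) : Decidable (Spec_token2cwsw tokens cw_list sw_list cw_token sw_token none_token both_token out) := by unfold Spec_token2cwsw; infer_instance

-- ===== CLAIM (what is proved, stated in full; the proofs are below) =====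
def Claim_equal_token2cwsw : Prop := ∀ (tokens : List String) (cw_list : List String) (sw_list : List String) (cw_token : String) (sw_token : String) (none_token : String) (both_token : String), Dom_token2cwsw tokens cw_list sw_list cw_token sw_token none_token both_token → Spec_token2cwsw tokens cw_list sw_list cw_token sw_token none_token both_token (token2cwsw tokens cw_list sw_list cw_token sw_token none_token both_token)

-- ===== LEMMAS AND PROOFS =====

-- a foldl of inserts whose value depends only on the key: lookup is 'if t ∈ l then f t else previous'
theorem get?_foldl_insert_fn (f : String → String) (l : List String) (d : PySem.Dict String String) (t : String) :
    (l.foldl (fun d w => d.insert w (f w)) d).get? t = if t ∈ l then some (f t) else d.get? t := by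
  induction l generalizing d with
  | nil => simp
  | cons w l ih =>
    simp only [List.foldl_cons, ih, PySem.Dict.get?_insert, List.mem_cons]
    split_ifs <;> simp_all

theorem get?_ofList_const (v : String) (l : List String) (t : String) :
    (PySem.Dict.ofList (l.map (fun w => (w, v)))).get? t = if t ∈ l then some v else none := by
  have : PySem.Dict.ofList (l.map (fun w => (w, v))) =
      l.foldl (fun d w => d.insert w ((fun _ => v) w)) PySem.Dict.empty := by
    simp [PySem.Dict.ofList, PySem.Dict.update, List.foldl_map]
  rw [this, get?_foldl_insert_fn]
  simp

-- A's foldl-with-append is the map of the branch function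
theorem foldl_append_map (g : String → String) (l : List String) (acc : List String) :
    l.foldl (fun a x => a ++ [g x]) acc = acc ++ l.map g := by
  induction l generalizing acc with
  | nil => simp
  | cons x l ih => simp [ih]

-- ===== VERDICT (by name: the statement is the Claim_ definition above) =====
theorem token2cwsw_spec : Claim_equal_token2cwsw := by
  intro tokens cw_list sw_list cw_token sw_token none_token both_token _
  unfold Spec_token2cwsw token2cwsw token2cwsw_alt
  have h : (fun a (x : String) => if x ∈ cw_list then
        if x ∈ sw_list then a ++ [both_token] else a ++ [cw_token]
      else if x ∈ sw_list then a ++ [sw_token] else a ++ [none_token]) =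
      fun a x => a ++ [(fun t => if t ∈ cw_list then
        (if t ∈ sw_list then both_token else cw_token)
      else if t ∈ sw_list then sw_token else none_token) x] := by
    funext a x; simp only []; split_ifs <;> simp_all
  rw [h, foldl_append_map]
  simp only [List.nil_append]
  apply List.map_congr_left
  intro t _
  rw [PySem.Dict.getD_eq_get?_getD, get?_foldl_insert_fn, get?_ofList_const]
  simp only [PySem.Set.mem_ofList]
  split_ifs <;> simp_all
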